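-- pv_equiv track=rewrite | github.com/Professor-Emanuel/Codility-Problems | Python/GamersChallenge.py | fragments
-- ===== SOURCE A (Python) =====
-- def fragments(S):
--     i = 0
--     while i < len(S):
--         d = 1
--         ## while in the string and reading the same letters as the first letter of the fragment, then increase the length
--         while i+d < len(S) and S[i+d] == S[i]:
--             d += 1
--         ## if the 1st letter was not ? then i will return the fragment using the Python construct 'yield' -> yes i have another element to generate
--         ## and the generator will be stopped here when the next element is requested by the function that called the generator
--         if S[i] != '?':
--             yield (i, d)
--         i += d
-- ===== SOURCE B (Python) =====
-- def fragments(S):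
--     # Boundary-index decomposition: one scan builds the run boundaries,
--     # a second pass over consecutive boundary pairs yields the fragments.
--     if not S:
--         return
--     bounds = [0]
--     for i in range(1, len(S)):
--         if S[i] != S[i - 1]:
--             bounds.append(i)
--     bounds.append(len(S))
--     for s, e in zip(bounds, bounds[1:]):
--         if S[s] != '?':
--             yield (s, e - s)
-- ===== Notes on version B (the rewrite author's own statement) =====
-- stated objective: alternative
-- what changed: Replaces the nested inner-while run scan by a boundary-index decomposition: one flat scan collects all run-start boundaries (plus a trailing len(S) sentinel), then a second pass over consecutive boundary pairs yields (start, end-start) for runs not starting with '?'.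
import Mathlib
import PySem

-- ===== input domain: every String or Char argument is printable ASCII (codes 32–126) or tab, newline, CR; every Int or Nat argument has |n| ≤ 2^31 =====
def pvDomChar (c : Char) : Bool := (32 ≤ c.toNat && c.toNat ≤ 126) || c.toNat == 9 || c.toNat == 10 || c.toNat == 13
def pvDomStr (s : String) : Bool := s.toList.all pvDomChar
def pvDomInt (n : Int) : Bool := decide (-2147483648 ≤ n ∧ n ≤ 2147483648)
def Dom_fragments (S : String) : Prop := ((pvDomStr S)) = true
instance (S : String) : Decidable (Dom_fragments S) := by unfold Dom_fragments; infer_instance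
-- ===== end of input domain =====

-- B replaces A's nested inner-while run scan by a boundary-index decomposition
-- (collect run boundaries in one scan, then pair consecutive boundaries); same cost.

-- ===== PORT A =====
-- inner while loop of A: d-1 = number of leading chars of `rest` equal to c
def runCount (c : Char) : List Char → Nat
  | [] => 0
  | x :: xs => if x = c then runCount c xs + 1 else 0

-- outer while loop of A: current position i, chars from position i
def loopA : List Char → Int → List (Int × Int)
  | [], _ => []
  | c :: rest, i =>
    let k := runCount c rest          -- inner while: d = k + 1
    let d : Int := (k : Int) + 1
    (if c ≠ '?' then [(i, d)] else []) ++ loopA (rest.drop k) (i + d)   -- i += d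
termination_by cs _ => cs.length
decreasing_by simp

def fragments (S : String) : List (Int × Int) := loopA S.toList 0

-- ===== PORT B =====
-- boundary list of Source B: [0] ++ [i in 1..n-1 with S[i] != S[i-1]] ++ [n]
-- (indices are in range, so Python's S[i] is ported as getD)
def boundsB (cs : List Char) : List Nat :=
  (0 :: (List.range' 1 (cs.length - 1)).filter
      (fun i => !(cs.getD i ' ' == cs.getD (i - 1) ' '))) ++ [cs.length]

-- body of Source B's second loop
def emitB (cs : List Char) (p : Nat × Nat) : Option (Int × Int) :=
  if cs.getD p.1 ' ' ≠ '?' then some ((p.1 : Int), (p.2 : Int) - (p.1 : Int)) else none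

def fragments_alt (S : String) : List (Int × Int) :=
  let cs := S.toList
  if cs.isEmpty then []
  else
    let bounds := boundsB cs
    (bounds.zip bounds.tail).filterMap (emitB cs)

-- ===== PRECONDITION & SPEC =====
def Spec_fragments (S : String) (out : List (Int × Int)) : Prop := out = fragments_alt S
instance (S : String) (out : List (Int × Int)) : Decidable (Spec_fragments S out) := by unfold Spec_fragments; infer_instance

-- ===== CLAIM (what is proved, stated in full; the proofs are below) =====
def Claim_equal_fragments : Prop := ∀ (S : String), Dom_fragments S → Spec_fragments S (fragments S)

-- ===== LEMMAS AND PROOFS =====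

lemma runCount_le (c : Char) (xs : List Char) : runCount c xs ≤ xs.length := by
  induction xs with
  | nil => simp [runCount]
  | cons x xs ih => simp only [runCount]; split <;> simp <;> omega

lemma getD_lt_runCount (c : Char) (xs : List Char) (j : Nat) (d : Char)
    (h : j < runCount c xs) : xs.getD j d = c := by
  induction xs generalizing j with
  | nil => simp [runCount] at h
  | cons x xs ih =>
    simp only [runCount] at h
    split at h
    · cases j with
      | zero => simpa using ‹x = c›
      | succ j => simpa using ih j (by omega)
    · omega

lemma getD_runCount_ne (c : Char) (xs : List Char) (d : Char)
    (h : runCount c xs < xs.length) : xs.getD (runCount c xs) d ≠ c := by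
  induction xs with
  | nil => simp at h
  | cons x xs ih =>
    simp only [runCount] at h ⊢
    split
    · rename_i hx
      simp only [List.getD_cons_succ]
      exact ih (by simp [hx] at h ⊢; omega)
    · simpa using ‹¬ x = c›

lemma getD_drop (l : List Char) (n j : Nat) (d : Char) :
    (l.drop n).getD j d = l.getD (n + j) d := by
  simp [List.getD, List.getElem?_drop]

lemma loopA_shift (cs : List Char) (i : Int) :
    loopA cs i = (loopA cs 0).map (fun p => (p.1 + i, p.2)) := by
  induction hn : cs.length using Nat.strong_induction_on generalizing cs i with
  | _ n ih =>
    cases cs with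
    | nil => rw [loopA]; rw [loopA]; simp
    | cons c rest =>
      have hk := runCount_le c rest
      have h1 : (rest.drop (runCount c rest)).length < n := by
        simp at hn ⊢; omega
      rw [loopA]
      rw [loopA]
      rw [ih _ h1 (rest.drop (runCount c rest)) (i + ((runCount c rest : Int) + 1)) rfl]
      rw [ih _ h1 (rest.drop (runCount c rest)) (0 + ((runCount c rest : Int) + 1)) rfl]
      simp only [List.map_append, List.map_map]
      congr 1
      · split <;> simp
      · apply List.map_congr_left; intro p _; simp [Prod.ext_iff]; omega

lemma loopA_nil (i : Int) : loopA [] i = [] := by rw [loopA]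

lemma getD_run (c : Char) (rest : List Char) (d : Char) (i : Nat)
    (h : i ≤ runCount c rest) : (c :: rest).getD i d = c := by
  cases i with
  | zero => rfl
  | succ j => simpa using getD_lt_runCount c rest j d (by omega)

-- peel one run off the boundary list
lemma boundsB_peel (c : Char) (rest : List Char)
    (h : runCount c rest < rest.length) :
    boundsB (c :: rest) =
      0 :: (boundsB (rest.drop (runCount c rest))).map (· + (runCount c rest + 1)) := by
  have hk := runCount_le c rest
  set k := runCount c rest with hkdef
  set n' := rest.length - k with hn'
  have hlen : rest.length = k + n' := by omega
  have hn1 : 1 ≤ n' := by omega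
  unfold boundsB
  simp only [List.length_cons, Nat.add_sub_cancel, List.length_drop, ← hn']
  -- split the index range at the end of the first run
  have hsplit : List.range' 1 rest.length = List.range' 1 k ++ List.range' (1 + k) n' := by
    have h0 := List.range'_append (s := 1) (m := k) (n := n') (step := 1)
    simp only [Nat.one_mul] at h0
    rw [hlen, ← h0]
  rw [hsplit, List.filter_append]
  -- no boundary inside the first run
  have hf1 : (List.range' 1 k).filter
      (fun i => !((c :: rest).getD i ' ' == (c :: rest).getD (i - 1) ' ')) = [] := by
    rw [List.filter_eq_nil_iff]
    intro i hi
    rw [List.mem_range'_1] at hi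
    rw [getD_run c rest ' ' i (by omega), getD_run c rest ' ' (i - 1) (by omega)]
    simp
  -- the position right after the run is a boundary
  have hbd : (!((c :: rest).getD (1 + k) ' ' == (c :: rest).getD (1 + k - 1) ' ')) = true := by
    have e1 : (c :: rest).getD (1 + k) ' ' = rest.getD k ' ' := by
      rw [show 1 + k = k + 1 by omega]
      simp
    have e2 : (c :: rest).getD (1 + k - 1) ' ' = c := by
      simpa using getD_run c rest ' ' k (le_refl _)
    rw [e1, e2]
    simpa using getD_runCount_ne c rest ' ' h
  have hstep : List.range' (1 + k) n' = (1 + k) :: List.range' (1 + k + 1) (n' - 1) := by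
    rw [show n' = (n' - 1) + 1 by omega, List.range'_succ]
    norm_num
  rw [hstep, List.filter_cons, hbd]
  simp only [if_pos]
  rw [hf1, List.nil_append]
  -- boundaries after the run are the shifted boundaries of the remaining string
  have hmap : List.range' (1 + k + 1) (n' - 1) =
      (List.range' 1 (n' - 1)).map (fun x => (k + 1) + x) := by
    rw [List.map_add_range']
    congr 1
    omega
  rw [hmap, List.filter_map]
  rw [List.filter_congr (q := fun i =>
      !((rest.drop k).getD i ' ' == (rest.drop k).getD (i - 1) ' ')) ?_]
  · -- assemble the two boundary lists
    have hfun : (fun x : Nat => (k + 1) + x) = (fun x : Nat => x + (k + 1)) := by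
      funext x; omega
    rw [hfun]
    simp only [List.map_append, List.map_cons, List.map_nil, List.cons_append]
    rw [show 1 + k = 0 + (k + 1) by omega, show rest.length + 1 = n' + (k + 1) by omega]
  · intro i hi
    rw [List.mem_range'_1] at hi
    have e1 : (c :: rest).getD ((k + 1) + i) ' ' = (rest.drop k).getD i ' ' := by
      rw [getD_drop, show (k + 1) + i = (k + i) + 1 by omega]
      simp
    have e2 : (c :: rest).getD ((k + 1) + i - 1) ' ' = (rest.drop k).getD (i - 1) ' ' := by
      rw [getD_drop, show (k + 1) + i - 1 = (k + (i - 1)) + 1 by omega]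
      simp
    simp only [Function.comp]
    rw [e1, e2]

lemma boundsB_last (c : Char) (rest : List Char)
    (h : runCount c rest = rest.length) :
    boundsB (c :: rest) = [0, rest.length + 1] := by
  unfold boundsB
  simp only [List.length_cons, Nat.add_sub_cancel]
  have hf : (List.range' 1 rest.length).filter
      (fun i => !((c :: rest).getD i ' ' == (c :: rest).getD (i - 1) ' ')) = [] := by
    rw [List.filter_eq_nil_iff]
    intro i hi
    rw [List.mem_range'_1] at hi
    rw [getD_run c rest ' ' i (by omega), getD_run c rest ' ' (i - 1) (by omega)]
    simp
  rw [hf]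
  simp

lemma main_lemma (cs : List Char) (h : cs ≠ []) :
    ((boundsB cs).zip (boundsB cs).tail).filterMap (emitB cs) = loopA cs 0 := by
  revert h
  induction hn : cs.length using Nat.strong_induction_on generalizing cs with
  | _ n ih =>
  cases cs with
  | nil => intro h; exact absurd rfl h
  | cons c rest =>
    intro _
    by_cases hr : runCount c rest < rest.length
    · -- peel one run and use the induction hypothesis on the rest
      have hk := runCount_le c rest
      set k := runCount c rest with hkdef
      have hne' : rest.drop k ≠ [] := by
        intro he
        have := congrArg List.length he
        simp at this
        omega
      have hlt : (rest.drop k).length < n := by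
        simp at hn ⊢
        omega
      rw [boundsB_peel c rest hr]
      obtain ⟨L, hb'⟩ : ∃ L, boundsB (rest.drop k) = 0 :: L := ⟨_, rfl⟩
      rw [hb']
      have hzip : ((0 :: (List.map (· + (k + 1)) (0 :: L))).zip
            (0 :: (List.map (· + (k + 1)) (0 :: L))).tail)
          = (0, k + 1) :: List.map (Prod.map (· + (k + 1)) (· + (k + 1))) ((0 :: L).zip L) := by
        rw [List.tail_cons, ← List.zip_map, List.map_cons, List.zip_cons_cons, Nat.zero_add]
      rw [hzip, List.filterMap_cons, List.filterMap_map]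
      have hemit : (emitB (c :: rest) ∘ Prod.map (· + (k + 1)) (· + (k + 1)))
          = fun p => Option.map (fun q => (q.1 + ((k : Int) + 1), q.2))
              (emitB (rest.drop k) p) := by
        funext p
        obtain ⟨a, b⟩ := p
        simp only [Function.comp_apply, Prod.map, emitB]
        have e1 : (c :: rest).getD (a + (k + 1)) ' ' = (rest.drop k).getD a ' ' := by
          rw [getD_drop, show a + (k + 1) = (k + a) + 1 by omega]
          simp
        rw [e1]
        split
        · simp only [Option.map_some]
          congr 1
          simp only [Prod.mk.injEq]
          constructor <;> push_cast <;> ring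
        · simp
      rw [hemit, ← List.map_filterMap,
        show ((0 : Nat) :: L).zip L = (boundsB (rest.drop k)).zip (boundsB (rest.drop k)).tail from by
          rw [hb', List.tail_cons],
        ih _ hlt (rest.drop k) rfl hne']
      rw [← loopA_shift]
      rw [loopA]
      have hhead : emitB (c :: rest) (0, k + 1)
          = if c ≠ '?' then some ((0 : Int), ((k : Int) + 1)) else none := by
        simp [emitB]
      rw [hhead]
      by_cases hc : c = '?'
      · simp only [hc, ne_eq, not_true_eq_false, if_false, List.nil_append, Int.zero_add]
        rw [← hc, ← hkdef]
      · simp [hc]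
        exact ⟨hkdef, by rw [← hkdef]⟩
    · -- the whole string is a single run
      have hr' : runCount c rest = rest.length :=
        Nat.le_antisymm (runCount_le c rest) (Nat.le_of_not_lt hr)
      rw [boundsB_last c rest hr', loopA, hr', List.drop_length, loopA_nil]
      by_cases hc : c = '?' <;> simp [hc, emitB, List.zip]

-- ===== VERDICT (by name: the statement is the Claim_ definition above) =====
theorem fragments_spec : Claim_equal_fragments := by
  intro S _
  unfold Spec_fragments fragments fragments_alt
  by_cases h : S.toList = []
  · rw [h]; rw [loopA]; simp
  · simp only [List.isEmpty_iff, h]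
    exact (main_lemma _ h).symm
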